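-- pv_equiv track=rewrite | github.com/DAMT777/Opti_Learn | Proyecto_PNL/opti_learn/opti_app/core/message_parser.py | _trim_expr_noise
-- ===== SOURCE A (Python) =====
-- def _trim_expr_noise(expr: str) -> str:
--     if not expr:
--         return expr
--     lower = expr.lower()
--     markers = [
--         ' donde',
--         '\ndonde',
--         ' sujeto',
--         ' subject',
--         ' en este',
--         'en este',
--         ' objetivo',
--         ' objective',
--         ' restriccion',
--         ' restricción',
--     ]
--     indices = [lower.find(marker) for marker in markers if lower.find(marker) != -1]
--     if indices:
--         cut = min(pos for pos in indices if pos >= 0)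
--         expr = expr[:cut]
--     if '=' in expr:
--         first = expr.find('=')
--         second = expr.find('=', first + 1)
--         if second != -1:
--             expr = expr[:second]
--     return expr.strip()
-- ===== SOURCE B (Python) =====
-- _MARKERS = (' donde', '\ndonde', ' sujeto', ' subject', ' en este', 'en este',
--             ' objetivo', ' objective', ' restriccion', ' restricci\u00f3n')
--
--
-- def _trim_expr_noise(expr: str) -> str:
--     # One fused left-to-right scan: stop at the first position where either a
--     # noise marker starts (case-insensitive) or the second equals sign appears.
--     lower = expr.lower()
--     cut = len(expr)
--     eq_seen = 0
--     for i in range(len(expr)):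
--         if any(lower.startswith(m, i) for m in _MARKERS):
--             cut = i
--             break
--         if expr[i] == '=':
--             eq_seen += 1
--             if eq_seen == 2:
--                 cut = i
--                 break
--     return expr[:cut].strip()
-- ===== Notes on version B (the rewrite author's own statement) =====
-- stated objective: alternative
-- what changed: B replaces A's staged passes (ten per-marker find scans reduced by min, then a find/findFrom pass for the second equals sign) with a single fused left-to-right scan carrying an equals counter that stops at the first position where either a noise marker starts or the second equals sign appears.
import Mathlib
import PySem

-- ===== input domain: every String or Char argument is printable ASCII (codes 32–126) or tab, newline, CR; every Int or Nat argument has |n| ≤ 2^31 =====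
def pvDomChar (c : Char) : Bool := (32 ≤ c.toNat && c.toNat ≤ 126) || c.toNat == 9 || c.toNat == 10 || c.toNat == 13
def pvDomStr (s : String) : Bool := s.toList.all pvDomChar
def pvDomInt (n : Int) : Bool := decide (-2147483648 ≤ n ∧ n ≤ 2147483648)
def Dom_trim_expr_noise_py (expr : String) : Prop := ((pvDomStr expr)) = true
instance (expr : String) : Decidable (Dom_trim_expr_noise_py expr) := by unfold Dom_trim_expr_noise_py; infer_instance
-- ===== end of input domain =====

-- B replaces A's staged passes (ten per-marker find scans + min reduction, then a find/findFrom
-- truncation at the second equals sign) by ONE fused left-to-right scan with an equals counter that stops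
-- at the first position where a marker starts or the second equals sign appears; same return value (not claimed faster).

-- ===== PORT A =====
def pvMarkersA : List (List Char) :=
  [" donde".toList, "\ndonde".toList, " sujeto".toList, " subject".toList,
   " en este".toList, "en este".toList, " objetivo".toList, " objective".toList,
   " restriccion".toList, " restricción".toList]

-- indices = [lower.find(marker) for marker in markers if lower.find(marker) != -1]
def pvIndicesA (lower : List Char) : List Int :=
  pvMarkersA.filterMap (fun m =>
    if PySem.Chars.find lower m ≠ -1 then some (PySem.Chars.find lower m) else none)

-- if indices: cut = min(pos for pos in indices if pos >= 0); expr = expr[:cut]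
def pvCutA (s lower : List Char) : List Char :=
  let indices := pvIndicesA lower
  if indices.isEmpty then s
  else
    match PySem.List.min? (indices.filter (fun p => decide (0 ≤ p))) id with
    | some cut => PySem.Chars.slice s none (some cut)
    | none => s   -- unreachable: every element of indices is ≥ 0 (Python's min never sees an empty generator here)

-- if '=' in expr: first = expr.find('='); second = expr.find('=', first+1); if second != -1: expr = expr[:second]
def pvEqCutA (t : List Char) : List Char :=
  if PySem.Chars.isIn ['='] t then
    let first := PySem.Chars.find t ['=']
    let second := PySem.Chars.findFrom t ['='] (first + 1)
    if second ≠ -1 then PySem.Chars.slice t none (some second) else t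
  else t

def trim_expr_noise_py (expr : String) : String :=
  if expr.toList.isEmpty then expr
  else
    String.ofList (PySem.Chars.strip (pvEqCutA (pvCutA expr.toList (PySem.Chars.lower expr.toList))))

-- ===== PORT B =====
-- _MARKERS
def pvMarkersB : List (List Char) :=
  [" donde".toList, "\ndonde".toList, " sujeto".toList, " subject".toList,
   " en este".toList, "en este".toList, " objetivo".toList, " objective".toList,
   " restriccion".toList, " restricción".toList]

-- the 'for i in range(len(expr))' loop with its break: state = (i, eq_seen), returns cut
-- (cut = len(expr) when the loop runs off the end; lower.startswith(m, i) with 0 ≤ i ≤ len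
-- is exactly 'm is a prefix of lower[i:]', ported as startswith (lower.drop i) m).
def pvLoopB (s lower : List Char) (n i eq : Nat) : Nat :=
  if h : i < n then
    if pvMarkersB.any (fun m => PySem.Chars.startswith (lower.drop i) m) then i
    else if s[i]? = some '=' then
      if eq + 1 = 2 then i else pvLoopB s lower n (i + 1) (eq + 1)
    else pvLoopB s lower n (i + 1) eq
  else n
termination_by n - i

def trim_expr_noise_py_alt (expr : String) : String :=
  let s := expr.toList
  let cut := pvLoopB s (PySem.Chars.lower s) s.length 0 0
  String.ofList (PySem.Chars.strip (PySem.Chars.slice s none (some (cut : Int))))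

-- ===== PRECONDITION & SPEC =====
def Spec_trim_expr_noise_py (expr : String) (out : String) : Prop := out = trim_expr_noise_py_alt expr
instance (expr : String) (out : String) : Decidable (Spec_trim_expr_noise_py expr out) := by unfold Spec_trim_expr_noise_py; infer_instance

-- ===== CLAIM (what is proved, stated in full; the proofs are below) =====
def Claim_equal_trim_expr_noise_py : Prop := ∀ (expr : String), Dom_trim_expr_noise_py expr → Spec_trim_expr_noise_py expr (trim_expr_noise_py expr)

-- ===== LEMMAS AND PROOFS =====

lemma pv_markers_eq : pvMarkersB = pvMarkersA := rfl

-- proof-side abbreviations: 'a marker starts at j', '"=" at j', 'the fused loop stops at j'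
def pvM (L : List Char) (j : Nat) : Bool := pvMarkersB.any (fun m => PySem.Chars.startswith (L.drop j) m)
def pvE (s : List Char) (j : Nat) : Bool := decide (s[j]? = some '=')
def pvP (s L : List Char) (j : Nat) : Bool :=
  pvM L j || (pvE s j && (((List.range j).filter (pvE s)).length == 1))

-- A-side characterisation of the marker phase: the leftmost position where some marker starts
def pvSearch (L : List Char) : Option Nat :=
  (List.range (L.length + 1)).find? (fun i => pvM L i)

-- A-side characterisation of the '=' phase: cut before the second '=' position
def pvEqFilter (t : List Char) : List Char :=
  match (List.range t.length).filter (pvE t) with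
  | _ :: j :: _ => t.take j
  | _ => t

lemma pv_singleton_prefix_iff (c : Char) (l : List Char) : [c] <+: l ↔ l.head? = some c := by
  constructor
  · rintro ⟨u, rfl⟩; rfl
  · intro h
    cases l with
    | nil => simp at h
    | cons x xs => simp at h; exact ⟨xs, by simp [h]⟩

lemma pv_find?_range_eq_none {p : Nat → Bool} {n : Nat} (h : ∀ i, i < n → p i = false) :
    (List.range n).find? p = none := by
  apply List.find?_eq_none.2
  intro i hi
  simp [h i (List.mem_range.1 hi)]

lemma pv_find?_range_eq_some {p : Nat → Bool} {n k : Nat} (hk : k < n) (hp : p k = true)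
    (hmin : ∀ i, i < k → p i = false) : (List.range n).find? p = some k := by
  have h1 : n = k + (n - k) := by omega
  rw [h1, List.range_add, List.find?_append]
  have h2 : (List.range k).find? p = none := by
    apply List.find?_eq_none.2; intro i hi; simp [hmin i (List.mem_range.1 hi)]
  rw [h2]
  have h3 : n - k = 1 + (n - k - 1) := by omega
  rw [h3, List.range_add, List.map_append]
  simp [List.range_one, hp]

-- first-match property of find? over a range
lemma pv_find?_range_spec {p : Nat → Bool} {n k : Nat} (h : (List.range n).find? p = some k) :
    p k = true ∧ k < n ∧ ∀ j, j < k → p j = false := by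
  induction n with
  | zero => simp at h
  | succ n ih =>
    rw [List.range_succ, List.find?_append] at h
    cases hf : (List.range n).find? p with
    | some k' =>
      rw [hf] at h
      simp at h
      subst h
      obtain ⟨h1, h2, h3⟩ := ih hf
      exact ⟨h1, by omega, h3⟩
    | none =>
      rw [hf] at h
      simp at h
      obtain ⟨hpn, hk⟩ := h
      subst hk
      refine ⟨hpn, by omega, ?_⟩
      intro j hj
      have := List.find?_eq_none.1 hf j (by simp; omega)
      simpa using this

lemma pv_takeWhile_all_false {α : Type} (p : α → Bool) (l : List α)
    (h : ∀ x ∈ l, p x = false) : l.takeWhile p = [] := by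
  cases l with
  | nil => rfl
  | cons a l => simp [h a (by simp)]

-- filter of a shorter range = takeWhile of the longer one
lemma pv_filter_range_prefix (q : Nat → Bool) {k n : Nat} (hk : k ≤ n) :
    (List.range k).filter q = ((List.range n).filter q).takeWhile (fun x => decide (x < k)) := by
  rw [show n = k + (n - k) by omega, List.range_add, List.filter_append,
      List.takeWhile_append_of_pos (by intro x hx; simp at hx ⊢; omega)]
  rw [pv_takeWhile_all_false _ _ (by intro x hx; simp at hx ⊢; obtain ⟨a, _, rfl⟩ := hx.1; omega)]
  simp

lemma pv_filter_range_single {q : Nat → Bool} {n p1 : Nat}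
    (h : (List.range n).filter q = [p1]) : (List.range p1).filter q = [] := by
  have hp1 : p1 < n := by
    have : p1 ∈ (List.range n).filter q := by rw [h]; simp
    simp at this; exact this.1
  rw [pv_filter_range_prefix q (le_of_lt hp1), h]
  simp

lemma pv_filter_range_second {q : Nat → Bool} {n p1 p2 : Nat} {rest : List Nat}
    (h : (List.range n).filter q = p1 :: p2 :: rest) :
    q p2 = true ∧ p2 < n ∧ (List.range p2).filter q = [p1] ∧ (List.range p1).filter q = [] := by
  have hmem : p2 ∈ (List.range n).filter q := by rw [h]; simp
  simp at hmem
  have hpair : ((List.range n).filter q).Pairwise (· < ·) :=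
    List.Pairwise.sublist List.filter_sublist List.pairwise_lt_range
  rw [h] at hpair
  have h12 : p1 < p2 := by
    have := List.pairwise_cons.1 hpair
    exact this.1 p2 (by simp)
  have hA : (List.range p2).filter q = [p1] := by
    rw [pv_filter_range_prefix q (le_of_lt hmem.1), h]
    simp [h12]
  exact ⟨hmem.2, hmem.1, hA, pv_filter_range_single hA⟩

lemma pv_mem_filter_range {q : Nat → Bool} {j k : Nat} (hj : j < k) (hq : q j = true) :
    j ∈ (List.range k).filter q := by
  simp [hj, hq]

-- == phase 1: A's min-of-finds over the markers IS the leftmost marker position ==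
lemma pv_phase1_eq (s L : List Char) :
    pvCutA s L = (match pvSearch L with
                  | some i => PySem.Chars.slice s none (some (i : Int))
                  | none => s) := by
  by_cases hex : ∃ m ∈ pvMarkersA, PySem.Chars.find L m ≠ -1
  · obtain ⟨m0, hm0, hf0⟩ := hex
    have hmem : ∀ p ∈ pvIndicesA L, ∃ m ∈ pvMarkersA, PySem.Chars.find L m = p ∧ 0 ≤ p := by
      intro p hp
      unfold pvIndicesA at hp
      rw [List.mem_filterMap] at hp
      obtain ⟨m, hm, hfm⟩ := hp
      by_cases hne : PySem.Chars.find L m ≠ -1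
      · rw [if_pos hne] at hfm
        have h1 := PySem.Chars.neg_one_le_find L m
        refine ⟨m, hm, by simpa using hfm, ?_⟩
        have : PySem.Chars.find L m = p := by simpa using hfm
        omega
      · rw [if_neg hne] at hfm; exact absurd hfm (by simp)
    have hinmem : ∀ m ∈ pvMarkersA, PySem.Chars.find L m ≠ -1 → PySem.Chars.find L m ∈ pvIndicesA L := by
      intro m hm hne
      unfold pvIndicesA
      rw [List.mem_filterMap]
      exact ⟨m, hm, by rw [if_pos hne]⟩
    have hne : (pvIndicesA L).isEmpty = false := by
      rw [List.isEmpty_eq_false_iff_exists_mem]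
      exact ⟨_, hinmem m0 hm0 hf0⟩
    have hfilter : (pvIndicesA L).filter (fun p => decide (0 ≤ p)) = pvIndicesA L := by
      apply List.filter_eq_self.2
      intro p hp
      obtain ⟨m, _, _, hp0⟩ := hmem p hp
      simpa using hp0
    obtain ⟨cut, hcut⟩ : ∃ c, PySem.List.min? ((pvIndicesA L).filter (fun p => decide (0 ≤ p))) id = some c := by
      cases h : PySem.List.min? ((pvIndicesA L).filter (fun p => decide (0 ≤ p))) id with
      | none =>
        rw [PySem.List.min?_eq_none_iff, hfilter] at h
        rw [h] at hne; simp at hne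
      | some c => exact ⟨c, rfl⟩
    have hcutmem : cut ∈ pvIndicesA L := by
      have := PySem.List.min?_mem hcut; rwa [hfilter] at this
    have hcutmin : ∀ y ∈ pvIndicesA L, cut ≤ y := by
      intro y hy
      have := PySem.List.min?_isMin hcut y (by rwa [hfilter])
      simpa using this
    obtain ⟨m1, hm1, hfm1, hcut0⟩ := hmem cut hcutmem
    have hkcast : ((cut.toNat : Nat) : Int) = cut := Int.toNat_of_nonneg hcut0
    have hspec1 := PySem.Chars.find_spec (s := L) (sub := m1) (by rw [hfm1]; exact hcut0)
    rw [hfm1] at hspec1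
    have hp : pvM L cut.toNat = true := by
      rw [pvM, List.any_eq_true]
      exact ⟨m1, by rwa [pv_markers_eq], (PySem.Chars.startswith_iff _ _).2 hspec1.1⟩
    have hmin : ∀ i, i < cut.toNat → pvM L i = false := by
      intro i hi
      rw [pvM, List.any_eq_false]
      intro m hm
      rw [pv_markers_eq] at hm
      intro hsw
      have hpre : m <+: L.drop i := (PySem.Chars.startswith_iff _ _).1 hsw
      have hisin : PySem.Chars.isIn m L = true := (PySem.Chars.exists_prefix_drop_iff_isIn m L).1 ⟨i, hpre⟩
      have hfge : 0 ≤ PySem.Chars.find L m := (PySem.Chars.find_nonneg_iff L m).2 ((PySem.Chars.isIn_iff_infix m L).1 hisin)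
      have hmemf : PySem.Chars.find L m ∈ pvIndicesA L := hinmem m hm (by omega)
      have hle : cut ≤ PySem.Chars.find L m := hcutmin _ hmemf
      have hspec2 := PySem.Chars.find_spec (s := L) (sub := m) hfge
      exact hspec2.2 i (by omega) hpre
    have hklen : cut.toNat < L.length + 1 := by
      have := PySem.Chars.find_le_length L m1
      omega
    have hsearch : pvSearch L = some cut.toNat :=
      pv_find?_range_eq_some hklen hp hmin
    unfold pvCutA
    simp only [hne, Bool.false_eq_true, if_false, hcut, hsearch, hkcast]
  · push Not at hex
    have hind : pvIndicesA L = [] := by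
      unfold pvIndicesA
      apply List.filterMap_eq_nil_iff.2
      intro m hm; simp [hex m hm]
    have hsearch : pvSearch L = none := by
      unfold pvSearch
      apply pv_find?_range_eq_none
      intro i _
      rw [pvM, List.any_eq_false]
      intro m hm
      rw [pv_markers_eq] at hm
      intro hsw
      have hpre : m <+: L.drop i := (PySem.Chars.startswith_iff _ _).1 hsw
      have hisin : PySem.Chars.isIn m L = true := (PySem.Chars.exists_prefix_drop_iff_isIn m L).1 ⟨i, hpre⟩
      have : PySem.Chars.find L m ≠ -1 := (PySem.Chars.find_ne_neg_one_iff L m).2 ((PySem.Chars.isIn_iff_infix m L).1 hisin)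
      exact this (hex m hm)
    unfold pvCutA
    simp [hind, hsearch]

lemma pv_prefix_eq_iff (t : List Char) (i : Nat) : (['='] <+: t.drop i) ↔ t[i]? = some '=' := by
  rw [pv_singleton_prefix_iff, List.head?_drop]

lemma pv_filter_range_head {p : Nat → Bool} {n k : Nat} (hk : k < n) (hp : p k = true)
    (hmin : ∀ i, i < k → p i = false) :
    (List.range n).filter p = k :: (List.range n).filter (fun i => p i && decide (k < i)) := by
  have h1 : n = (k + 1) + (n - (k+1)) := by omega
  rw [h1, List.range_add, List.filter_append, List.filter_append]
  have hra : List.range (k+1) = List.range k ++ [k] := by rw [List.range_add]; simp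
  rw [hra, List.filter_append, List.filter_append]
  have h2 : (List.range k).filter p = [] := by
    apply List.filter_eq_nil_iff.2; intro i hi; simp [hmin i (List.mem_range.1 hi)]
  have h2' : (List.range k).filter (fun i => p i && decide (k < i)) = [] := by
    apply List.filter_eq_nil_iff.2; intro i hi
    have := List.mem_range.1 hi; simp; omega
  have h3 : [k].filter p = [k] := by simp [hp]
  have h3' : [k].filter (fun i => p i && decide (k < i)) = [] := by simp
  have h4 : (List.map (fun x => k + 1 + x) (List.range (n - (k+1)))).filter p
      = (List.map (fun x => k + 1 + x) (List.range (n - (k+1)))).filter (fun i => p i && decide (k < i)) := by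
    apply List.filter_congr
    intro i hi
    simp only [List.mem_map] at hi
    obtain ⟨x, _, rfl⟩ := hi
    have hkx : k < k + 1 + x := by omega
    simp [hkx]
  rw [h2, h2', h3, h3', h4]
  simp

-- == phase 2: A's find / findFrom truncation at the second '=' IS 'cut before the second '=' index' ==
lemma pv_phase2_eq (t : List Char) : pvEqCutA t = pvEqFilter t := by
  by_cases hin : PySem.Chars.isIn ['='] t = true
  · have hinf : ['='] <:+: t := (PySem.Chars.isIn_iff_infix _ _).1 hin
    have hf0 : 0 ≤ PySem.Chars.find t ['='] := (PySem.Chars.find_nonneg_iff _ _).2 hinf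
    set k1 := (PySem.Chars.find t ['=']).toNat with hk1
    have hk1cast : ((k1 : Nat) : Int) = PySem.Chars.find t ['='] := Int.toNat_of_nonneg hf0
    have hspec1 := PySem.Chars.find_spec (s := t) (sub := ['=']) hf0
    have hp1 : pvE t k1 = true := by
      simp [pvE, (pv_prefix_eq_iff t k1).1 hspec1.1]
    have hmin1 : ∀ i, i < k1 → pvE t i = false := by
      intro i hi
      have := hspec1.2 i hi
      rw [pv_prefix_eq_iff] at this
      simpa [pvE] using this
    have hk1n : k1 < t.length := by
      have := (pv_prefix_eq_iff t k1).1 hspec1.1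
      exact List.getElem?_eq_some_iff.1 this |>.1
    have hsplit1 := pv_filter_range_head (p := pvE t) hk1n hp1 hmin1
    have hff := PySem.Chars.findFrom_natCast t ['='] (k1 + 1) (by omega)
    have harg : PySem.Chars.find t ['='] + 1 = ((k1 + 1 : Nat) : Int) := by push_cast [hk1cast]; ring
    by_cases hf : PySem.Chars.find (t.drop (k1+1)) ['='] = -1
    · -- no second '='
      have hnod : ∀ j, ¬ ['='] <+: (t.drop (k1+1)).drop j := by
        intro j hpre
        have : PySem.Chars.isIn ['='] (t.drop (k1+1)) = true :=
          (PySem.Chars.exists_prefix_drop_iff_isIn _ _).1 ⟨j, hpre⟩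
        rw [PySem.Chars.isIn_iff_infix] at this
        exact (PySem.Chars.find_eq_neg_one_iff _ _).1 hf this
      have hfilter2 : (List.range t.length).filter (fun i => pvE t i && decide (k1 < i)) = [] := by
        apply List.filter_eq_nil_iff.2
        intro i _ hbi
        simp only [pvE, Bool.and_eq_true, decide_eq_true_eq] at hbi
        obtain ⟨hieq, hik⟩ := hbi
        apply hnod (i - (k1+1))
        rw [List.drop_drop, pv_prefix_eq_iff]
        have harith2 : k1 + 1 + (i - (k1+1)) = i := by omega
        rw [harith2]
        exact hieq
      simp only [pvEqCutA, pvEqFilter]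
      rw [if_pos hin, harg, hff, if_pos hf]
      simp only [hsplit1, hfilter2]
      simp
    · -- a second '=' exists
      have hd0 : 0 ≤ PySem.Chars.find (t.drop (k1+1)) ['='] := by
        have := PySem.Chars.neg_one_le_find (t.drop (k1+1)) ['=']
        omega
      set f := (PySem.Chars.find (t.drop (k1+1)) ['=']).toNat with hfdef
      have hfcast : ((f : Nat) : Int) = PySem.Chars.find (t.drop (k1+1)) ['='] := Int.toNat_of_nonneg hd0
      have hspec2 := PySem.Chars.find_spec (s := t.drop (k1+1)) (sub := ['=']) hd0
      set k2 := k1 + 1 + f with hk2def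
      have ht2 : t[k2]? = some '=' := by
        have hpre := hspec2.1
        rw [List.drop_drop] at hpre
        exact (pv_prefix_eq_iff t k2).1 hpre
      have hp2 : (pvE t k2 && decide (k1 < k2)) = true := by
        simp [pvE, ht2]; omega
      have hmin2 : ∀ i, i < k2 → (pvE t i && decide (k1 < i)) = false := by
        intro i hi
        rw [← Bool.not_eq_true]
        intro hbi
        simp only [pvE, Bool.and_eq_true, decide_eq_true_eq] at hbi
        obtain ⟨hieq, hik⟩ := hbi
        apply hspec2.2 (i - (k1+1)) (by omega)
        rw [List.drop_drop, pv_prefix_eq_iff]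
        have harith2 : k1 + 1 + (i - (k1+1)) = i := by omega
        rw [harith2]
        exact hieq
      have hk2n : k2 < t.length := List.getElem?_eq_some_iff.1 ht2 |>.1
      have hsplit2 := pv_filter_range_head
        (p := fun i => pvE t i && decide (k1 < i)) hk2n hp2 hmin2
      have hsec : ((k1 + 1 : Nat) : Int) + PySem.Chars.find (t.drop (k1+1)) ['='] = ((k2 : Nat) : Int) := by
        rw [← hfcast]; push_cast; omega
      simp only [pvEqCutA, pvEqFilter]
      rw [if_pos hin, harg, hff, if_neg hf, hsec, if_pos (show ((k2 : Nat) : Int) ≠ -1 from by omega)]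
      simp only [hsplit1, hsplit2]
      simp [PySem.List.slice_to_natCast]
  · have hfilter : (List.range t.length).filter (pvE t) = [] := by
      apply List.filter_eq_nil_iff.2
      intro i _ hbi
      simp only [pvE, decide_eq_true_eq] at hbi
      apply hin
      exact (PySem.Chars.exists_prefix_drop_iff_isIn _ _).1 ⟨i, (pv_prefix_eq_iff t i).2 hbi⟩
    simp only [pvEqCutA, pvEqFilter]
    rw [if_neg hin]
    simp only [hfilter]

-- == B's fused loop stops exactly at the first index j with pvP s L j ==
lemma pv_loop_eq (s L : List Char) (n : Nat) :
    ∀ k i eq, n - i = k → i ≤ n → eq = ((List.range i).filter (pvE s)).length → eq ≤ 1 →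
      (∀ j, j < i → pvP s L j = false) →
      pvLoopB s L n i eq = ((List.range n).find? (pvP s L)).getD n := by
  intro k
  induction k with
  | zero =>
    intro i eq hk hle heq _ hmin
    have : i = n := by omega
    subst this
    rw [pvLoopB, dif_neg (by omega)]
    rw [pv_find?_range_eq_none hmin]
    rfl
  | succ k ih =>
    intro i eq hk hle heq heq1 hmin
    have hlt : i < n := by omega
    rw [pvLoopB, dif_pos hlt]
    by_cases hM : pvM L i = true
    · rw [if_pos (by rw [← pvM]; exact hM)]
      have hPi : pvP s L i = true := by rw [pvP, hM]; simp
      rw [pv_find?_range_eq_some hlt hPi hmin]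
      rfl
    · rw [if_neg (by rw [← pvM]; simpa using hM)]
      by_cases hE : s[i]? = some '='
      · rw [if_pos hE]
        by_cases h2 : eq + 1 = 2
        · rw [if_pos h2]
          have hPi : pvP s L i = true := by
            rw [pvP, pvE]
            simp [hE, ← heq]
            omega
          rw [pv_find?_range_eq_some hlt hPi hmin]
          rfl
        · rw [if_neg h2]
          have heq0 : eq = 0 := by omega
          have hPi : pvP s L i = false := by
            rw [pvP]
            simp [hM, pvE, hE, ← heq, heq0]
          apply ih (i + 1) (eq + 1) (by omega) (by omega) _ (by omega)
          · intro j hj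
            rcases Nat.lt_succ_iff_lt_or_eq.1 hj with h | h
            · exact hmin j h
            · subst h; exact hPi
          · rw [List.range_succ, List.filter_append]
            have : [i].filter (pvE s) = [i] := by simp [pvE, hE]
            rw [this]
            simp [heq]
      · rw [if_neg hE]
        have hPi : pvP s L i = false := by
          rw [pvP]
          simp [hM, pvE, hE]
        apply ih (i + 1) eq (by omega) (by omega) _ heq1
        · intro j hj
          rcases Nat.lt_succ_iff_lt_or_eq.1 hj with h | h
          · exact hmin j h
          · subst h; exact hPi
        · rw [List.range_succ, List.filter_append]
          have : [i].filter (pvE s) = [] := by simp [pvE, hE]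
          rw [this]
          simp [heq]

-- == the combination: A's two staged cuts = one cut at the first fused-stop position ==
lemma pv_combine (s : List Char) :
    pvEqCutA (pvCutA s (PySem.Chars.lower s)) =
      s.take (((List.range s.length).find? (pvP s (PySem.Chars.lower s))).getD s.length) := by
  set L := PySem.Chars.lower s with hLdef
  have hlen : L.length = s.length := by simp [hLdef, PySem.Chars.lower]
  set n := s.length with hndef
  rw [pv_phase1_eq]
  cases hS : pvSearch L with
  | none =>
    -- no marker anywhere
    have hMall : ∀ j, j < n + 1 → pvM L j = false := by
      intro j hj
      have := List.find?_eq_none.1 (by rw [← pvSearch]; exact hS) j (by simp [hlen]; omega)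
      simpa using this
    have hP : ∀ j, j < n → pvP s L j = (pvE s j && (((List.range j).filter (pvE s)).length == 1)) := by
      intro j hj
      rw [pvP, hMall j (by omega)]
      simp
    show pvEqCutA s = _
    rw [pv_phase2_eq, pvEqFilter]
    cases hF : (List.range n).filter (pvE s) with
    | nil =>
      have hnone : (List.range n).find? (pvP s L) = none := by
        apply pv_find?_range_eq_none
        intro j hj
        rw [hP j hj]
        by_cases hEj : pvE s j = true
        · exfalso
          have : j ∈ (List.range n).filter (pvE s) := pv_mem_filter_range hj hEj
          rw [hF] at this
          simp at this
        · simp [hEj]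
      rw [hnone]
      exact (List.take_length (l := s)).symm
    | cons p1 tl =>
      cases tl with
      | nil =>
        -- exactly one '='
        have hsingle : (List.range p1).filter (pvE s) = [] := pv_filter_range_single hF
        have hnone : (List.range n).find? (pvP s L) = none := by
          apply pv_find?_range_eq_none
          intro j hj
          rw [hP j hj]
          by_cases hEj : pvE s j = true
          · have hmem : j ∈ (List.range n).filter (pvE s) := pv_mem_filter_range hj hEj
            rw [hF] at hmem
            simp at hmem
            subst hmem
            rw [hsingle]
            simp
          · simp [hEj]
        rw [hnone]
        exact (List.take_length (l := s)).symm
      | cons p2 rest =>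
        -- a second '=' at p2
        obtain ⟨hq2, hp2n, hA2, hA1⟩ := pv_filter_range_second hF
        have hfind : (List.range n).find? (pvP s L) = some p2 := by
          apply pv_find?_range_eq_some hp2n
          · rw [hP p2 hp2n, hq2, hA2]; simp
          · intro j hj
            rw [hP j (by omega)]
            by_cases hEj : pvE s j = true
            · have : j ∈ (List.range p2).filter (pvE s) := pv_mem_filter_range hj hEj
              rw [hA2] at this
              simp at this
              subst this
              rw [hA1]
              simp
            · simp [hEj]
        rw [hfind]
        rfl
  | some kM =>
    obtain ⟨hMk, hkM1, hMmin⟩ := pv_find?_range_spec (by rw [← pvSearch]; exact hS)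
    -- a marker cannot start at position length (every marker is nonempty)
    have hkMn : kM < n := by
      rcases Nat.lt_succ_iff_lt_or_eq.1 (by rw [hlen] at hkM1; exact hkM1) with h | h
      · exact h
      · exfalso
        rw [pvM] at hMk
        rw [show L.drop kM = [] by rw [h, ← hlen]; simp] at hMk
        exact absurd hMk (by decide)
    -- phase-1 result is take kM
    have hslice : PySem.Chars.slice s none (some ((kM : Nat) : Int)) = s.take kM := by
      simp [PySem.List.slice_to_natCast]
    show pvEqCutA (PySem.Chars.slice s none (some ((kM : Nat) : Int))) = _
    rw [hslice, pv_phase2_eq]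
    set t := s.take kM with htdef
    have htlen : t.length = kM := by simp [htdef]; omega
    have htE : ∀ j, j < kM → pvE t j = pvE s j := by
      intro j hj
      simp [pvE, htdef, List.getElem?_take_of_lt hj]
    have hGF : (List.range t.length).filter (pvE t) = (List.range kM).filter (pvE s) := by
      rw [htlen]
      apply List.filter_congr
      intro j hj
      exact htE j (List.mem_range.1 hj)
    rw [pvEqFilter, hGF]
    cases hG : (List.range kM).filter (pvE s) with
    | nil =>
      have hfind : (List.range n).find? (pvP s L) = some kM := by
        apply pv_find?_range_eq_some hkMn
        · rw [pvP, hMk]; simp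
        · intro j hj
          rw [pvP, hMmin j hj]
          by_cases hEj : pvE s j = true
          · exfalso
            have : j ∈ (List.range kM).filter (pvE s) := pv_mem_filter_range hj hEj
            rw [hG] at this; simp at this
          · simp [hEj]
      rw [hfind]
      exact htdef
    | cons q1 tl =>
      cases tl with
      | nil =>
        have hsingle : (List.range q1).filter (pvE s) = [] := pv_filter_range_single hG
        have hfind : (List.range n).find? (pvP s L) = some kM := by
          apply pv_find?_range_eq_some hkMn
          · rw [pvP, hMk]; simp
          · intro j hj
            rw [pvP, hMmin j hj]
            by_cases hEj : pvE s j = true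
            · have : j ∈ (List.range kM).filter (pvE s) := pv_mem_filter_range hj hEj
              rw [hG] at this
              simp at this
              subst this
              rw [hsingle]
              simp
            · simp [hEj]
        rw [hfind]
        exact htdef
      | cons q2 rest =>
        obtain ⟨hq2, hq2k, hA2, hA1⟩ := pv_filter_range_second hG
        have hfind : (List.range n).find? (pvP s L) = some q2 := by
          apply pv_find?_range_eq_some (by omega)
          · rw [pvP, hq2, hA2]; simp
          · intro j hj
            rw [pvP, hMmin j (by omega)]
            by_cases hEj : pvE s j = true
            · have : j ∈ (List.range q2).filter (pvE s) := pv_mem_filter_range hj hEj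
              rw [hA2] at this
              simp at this
              subst this
              rw [hA1]
              simp
            · simp [hEj]
        rw [hfind]
        show t.take q2 = _
        simp [htdef, List.take_take, Nat.min_eq_left (le_of_lt hq2k)]

-- ===== VERDICT (by name: the statement is the Claim_ definition above) =====
theorem trim_expr_noise_py_spec : Claim_equal_trim_expr_noise_py := by
  intro expr _
  unfold Spec_trim_expr_noise_py trim_expr_noise_py trim_expr_noise_py_alt
  by_cases h : expr.toList.isEmpty
  · rw [List.isEmpty_iff] at h
    have he : expr = "" := String.toList_eq_nil_iff.mp h
    subst he
    show ("" : String) = String.ofList (PySem.Chars.strip (PySem.Chars.slice "".toList none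
      (some ((pvLoopB "".toList (PySem.Chars.lower "".toList) "".toList.length 0 0 : Nat) : Int))))
    rw [show pvLoopB "".toList (PySem.Chars.lower "".toList) "".toList.length 0 0 = 0 from by
      rw [pvLoopB]; simp]
    rfl
  · simp only [h, Bool.false_eq_true, if_false]
    set s := expr.toList with hsdef
    have hloop : pvLoopB s (PySem.Chars.lower s) s.length 0 0 =
        ((List.range s.length).find? (pvP s (PySem.Chars.lower s))).getD s.length := by
      apply pv_loop_eq s (PySem.Chars.lower s) s.length (s.length - 0) 0 0 rfl (by omega) (by simp) (by omega)
      intro j hj; omega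
    rw [hloop]
    have hcut : ((((List.range s.length).find? (pvP s (PySem.Chars.lower s))).getD s.length : Nat) : Int) =
        ((((List.range s.length).find? (pvP s (PySem.Chars.lower s))).getD s.length : Nat) : Int) := rfl
    rw [show PySem.Chars.slice s none
          (some ((((List.range s.length).find? (pvP s (PySem.Chars.lower s))).getD s.length : Nat) : Int)) =
        s.take (((List.range s.length).find? (pvP s (PySem.Chars.lower s))).getD s.length) by
      simp [PySem.List.slice_to_natCast]]
    rw [pv_combine]
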